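-- pv_equiv track=rewrite | github.com/adivarshney/ClearPath | app.py | build_project_reminders
-- ===== SOURCE A (Python) =====
-- def build_project_reminders(items):
--     overdue_items = [
--         {"id": item["id"], "condition_description": item["condition_description"], "due_date": item["display_due_date"]}
--         for item in items
--         if item["status"] == "Pending" and item["derived_status"] == "Overdue"
--     ]
--     upcoming_items = [
--         {"id": item["id"], "condition_description": item["condition_description"], "due_date": item["display_due_date"]}
--         for item in items
--         if item["status"] == "Pending" and item["derived_status"] == "Due in 7 days"
--     ]
--     return overdue_items, upcoming_items
-- ===== SOURCE B (Python) =====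
-- def build_project_reminders(items):
--     # Single pass with two accumulators instead of two filtering scans.
--     overdue_items = []
--     upcoming_items = []
--     for item in items:
--         if item["status"] == "Pending":
--             ds = item["derived_status"]
--             if ds == "Overdue" or ds == "Due in 7 days":
--                 row = {
--                     "id": item["id"],
--                     "condition_description": item["condition_description"],
--                     "due_date": item["display_due_date"],
--                 }
--                 if ds == "Overdue":
--                     overdue_items.append(row)
--                 else:
--                     upcoming_items.append(row)
--     return overdue_items, upcoming_items
-- ===== Notes on version B (the rewrite author's own statement) =====
-- stated objective: alternative
-- what changed: Replaces A's two independent filter-comprehension scans over items with one explicit loop that classifies each pending item once into two accumulator lists.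
import Mathlib
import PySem

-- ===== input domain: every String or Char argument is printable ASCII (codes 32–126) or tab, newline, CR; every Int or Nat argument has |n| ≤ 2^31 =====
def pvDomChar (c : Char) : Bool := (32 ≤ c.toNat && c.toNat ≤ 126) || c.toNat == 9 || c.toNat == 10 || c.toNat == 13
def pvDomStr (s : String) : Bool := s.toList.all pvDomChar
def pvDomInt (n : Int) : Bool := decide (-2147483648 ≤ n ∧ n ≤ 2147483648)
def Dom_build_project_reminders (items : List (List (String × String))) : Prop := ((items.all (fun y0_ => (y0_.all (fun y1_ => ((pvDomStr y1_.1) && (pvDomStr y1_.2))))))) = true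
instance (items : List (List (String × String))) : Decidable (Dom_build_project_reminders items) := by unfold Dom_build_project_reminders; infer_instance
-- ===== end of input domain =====

-- B: one explicit pass with two accumulator lists instead of A's two filter comprehensions (alternative decomposition, same cost).



-- ===== PORT A =====
-- Dict access item["k"]: List.lookup (first match) with getD "" under Pre_ (key present there;
-- Python raises KeyError where the key is absent — excluded by Pre_ below).
def pvRow (item : List (String × String)) : List (String × String) :=
  [("id", (item.lookup "id").getD ""),
   ("condition_description", (item.lookup "condition_description").getD ""),
   ("due_date", (item.lookup "display_due_date").getD "")]

def build_project_reminders (items : List (List (String × String))) : (List (List (String × String))) × (List (List (String × String))) :=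
  let overdue_items :=
    (items.filter (fun item =>
      (item.lookup "status").getD "" == "Pending" && (item.lookup "derived_status").getD "" == "Overdue")).map pvRow
  let upcoming_items :=
    (items.filter (fun item =>
      (item.lookup "status").getD "" == "Pending" && (item.lookup "derived_status").getD "" == "Due in 7 days")).map pvRow
  (overdue_items, upcoming_items)

-- ===== PORT B =====
def pvStep (acc : (List (List (String × String))) × (List (List (String × String)))) (item : List (String × String)) : (List (List (String × String))) × (List (List (String × String))) :=
  if (item.lookup "status").getD "" == "Pending" then
    let ds := (item.lookup "derived_status").getD ""
    if ds == "Overdue" || ds == "Due in 7 days" then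
      let row := [("id", (item.lookup "id").getD ""),
                  ("condition_description", (item.lookup "condition_description").getD ""),
                  ("due_date", (item.lookup "display_due_date").getD "")]
      if ds == "Overdue" then (acc.1 ++ [row], acc.2) else (acc.1, acc.2 ++ [row])
    else acc
  else acc

def build_project_reminders_alt (items : List (List (String × String))) : (List (List (String × String))) × (List (List (String × String))) :=
  items.foldl pvStep ([], [])

-- ===== PRECONDITION & SPEC =====
-- Pre_ excludes exactly the inputs where Python A raises KeyError: an item lacking "status",
-- a Pending item lacking "derived_status", or a matching Pending item lacking "id",
-- "condition_description" or "display_due_date".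
def Pre_build_project_reminders (items : List (List (String × String))) : Prop :=
  (items.all (fun item =>
    (item.lookup "status").isSome &&
    (if (item.lookup "status").getD "" == "Pending" then
      (item.lookup "derived_status").isSome &&
      (if (item.lookup "derived_status").getD "" == "Overdue" || (item.lookup "derived_status").getD "" == "Due in 7 days" then
        (item.lookup "id").isSome && (item.lookup "condition_description").isSome && (item.lookup "display_due_date").isSome
      else true)
    else true))) = true
instance (items : List (List (String × String))) : Decidable (Pre_build_project_reminders items) := by unfold Pre_build_project_reminders; infer_instance
def pvWitness_build_project_reminders : (List (List (String × String))) :=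
  [[("status", "Pending"), ("derived_status", "Overdue"), ("id", "1"), ("condition_description", "c"), ("display_due_date", "d")],
   [("status", "Done")]]

-- (Spec below)
def Spec_build_project_reminders (items : List (List (String × String))) (out : (List (List (String × String))) × (List (List (String × String)))) : Prop := out = build_project_reminders_alt items
instance (items : List (List (String × String))) (out : (List (List (String × String))) × (List (List (String × String)))) : Decidable (Spec_build_project_reminders items out) := by unfold Spec_build_project_reminders; infer_instance

-- ===== CLAIM (what is proved, stated in full; the proofs are below) =====
def Claim_equal_build_project_reminders : Prop := ∀ (items : List (List (String × String))), Dom_build_project_reminders items → Pre_build_project_reminders items → Spec_build_project_reminders items (build_project_reminders items)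

-- ===== LEMMAS AND PROOFS =====
-- Loop invariant: the fold with accumulators (ov, up) prepends ov/up to A's two filtered-mapped lists.
theorem pvStep_invariant (items : List (List (String × String))) :
    ∀ (ov up : List (List (String × String))),
      items.foldl pvStep (ov, up) =
        (ov ++ (items.filter (fun item =>
            (item.lookup "status").getD "" == "Pending" && (item.lookup "derived_status").getD "" == "Overdue")).map pvRow,
         up ++ (items.filter (fun item =>
            (item.lookup "status").getD "" == "Pending" && (item.lookup "derived_status").getD "" == "Due in 7 days")).map pvRow) := by
  induction items with
  | nil => intro ov up; simp
  | cons item rest ih =>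
    intro ov up
    simp only [List.foldl_cons, List.filter_cons]
    by_cases hs : ((item.lookup "status").getD "" == "Pending") = true
    · by_cases ho : ((item.lookup "derived_status").getD "" == "Overdue") = true
      · have hne : (item.lookup "derived_status").getD "" ≠ "Due in 7 days" := by
          have := eq_of_beq ho; simp_all
        simp [pvStep, hs, ho, pvRow, ih, hne]
      · by_cases hd : ((item.lookup "derived_status").getD "" == "Due in 7 days") = true
        · simp [pvStep, hs, ho, hd, pvRow, ih]
        · simp [pvStep, hs, ho, hd, ih]
    · simp [pvStep, hs, ih]

theorem build_project_reminders_spec : Claim_equal_build_project_reminders := by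
  intro items _ _
  unfold Spec_build_project_reminders build_project_reminders build_project_reminders_alt
  rw [pvStep_invariant]
  simp

-- ===== VERDICT (by name: the statement is the Claim_ definition above) =====
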